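-- pv_equiv track=rewrite | github.com/brenomencalha/desenvolve-python-basico | modulo6-listas/6.3-fatiamento/aula3_questao3.py | encontrar_intervalo_negativos
-- ===== SOURCE A (Python) =====
-- def encontrar_intervalo_negativos(lista):
--     max_negativos = 0
--     inicio_intervalo = 0
--     fim_intervalo = 0
--
--     for i in range(len(lista)):
--         for j in range(i+1, len(lista)+1):
--             sub_lista = lista[i:j]
--             negativos = sum(1 for x in sub_lista if x < 0)
--             if negativos > max_negativos:
--                 max_negativos = negativos
--                 inicio_intervalo = i
--                 fim_intervalo = j
--
--     return inicio_intervalo, fim_intervalo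
-- ===== SOURCE B (Python) =====
-- def encontrar_intervalo_negativos(lista):
--     # One backward scan: the maximal count of negatives is achieved first by
--     # the prefix ending just after the last negative element, so A's answer
--     # is (0, last_negative_index + 1), or (0, 0) if there is no negative.
--     for k in range(len(lista) - 1, -1, -1):
--         if lista[k] < 0:
--             return 0, k + 1
--     return 0, 0
-- ===== Notes on version B (the rewrite author's own statement) =====
-- stated objective: faster
-- what changed: Replaces the triple-nested scan over all intervals with a single backward scan for the last negative element: the earliest interval maximizing the negative count always starts at index 0 and ends just after the last negative element (an empty interval when the list has no negatives).
import Mathlib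
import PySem

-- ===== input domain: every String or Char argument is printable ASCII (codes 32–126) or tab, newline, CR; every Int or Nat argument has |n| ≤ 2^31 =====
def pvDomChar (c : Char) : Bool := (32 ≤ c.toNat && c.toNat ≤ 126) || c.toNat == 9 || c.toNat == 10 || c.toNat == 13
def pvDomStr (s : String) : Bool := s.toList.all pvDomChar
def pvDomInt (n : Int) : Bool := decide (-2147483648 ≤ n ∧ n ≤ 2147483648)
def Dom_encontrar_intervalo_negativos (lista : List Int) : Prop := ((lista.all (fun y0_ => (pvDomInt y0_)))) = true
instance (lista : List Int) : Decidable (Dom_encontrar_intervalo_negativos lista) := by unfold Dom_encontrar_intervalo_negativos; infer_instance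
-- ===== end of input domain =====

-- B replaces A's cubic scan over all intervals by a single backward scan for
-- the last negative element (the answer is (0, last_negative_index+1), or (0,0)).

-- ===== PORT A =====
def encontrar_intervalo_negativos (lista : List Int) : List Int :=
  let n : Int := PySem.List.len lista
  let st :=
    (PySem.List.pyRange 0 n 1).foldl
      (fun st i =>
        (PySem.List.pyRange (i + 1) (n + 1) 1).foldl
          (fun st j =>
            let sub := PySem.List.slice lista (some i) (some j)
            let negativos := sub.foldl (fun acc x => acc + (if x < 0 then 1 else 0)) (0 : Int)
            if negativos > st.1 then (negativos, i, j) else st)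
          st)
      ((0 : Int), (0 : Int), (0 : Int))
  [st.2.1, st.2.2]

-- ===== PORT B =====
-- backward scan: index k runs len-1, len-2, …; peeling the reversed list
def lastNegGo : List Int → Int → Int
  | [], _ => 0
  | x :: rest, k => if x < 0 then k + 1 else lastNegGo rest (k - 1)

def encontrar_intervalo_negativos_alt (lista : List Int) : List Int :=
  [0, lastNegGo lista.reverse ((lista.length : Int) - 1)]

-- ===== PRECONDITION & SPEC =====
def Spec_encontrar_intervalo_negativos (lista : List Int) (out : List Int) : Prop := out = encontrar_intervalo_negativos_alt lista
instance (lista : List Int) (out : List Int) : Decidable (Spec_encontrar_intervalo_negativos lista out) := by unfold Spec_encontrar_intervalo_negativos; infer_instance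

-- ===== CLAIM (what is proved, stated in full; the proofs are below) =====
def Claim_equal_encontrar_intervalo_negativos : Prop := ∀ (lista : List Int), Dom_encontrar_intervalo_negativos lista → Spec_encontrar_intervalo_negativos lista (encontrar_intervalo_negativos lista)

-- ===== LEMMAS AND PROOFS =====

-- 1-based position of the last negative element (0 if none)
def lastposI : List Int → Int
  | [] => 0
  | x :: r => if lastposI r > 0 then lastposI r + 1 else if x < 0 then 1 else 0

def cntNeg (xs : List Int) : Int := xs.foldl (fun acc x => acc + (if x < 0 then 1 else 0)) (0 : Int)

theorem cntNeg_acc (xs : List Int) : ∀ a : Int,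
    xs.foldl (fun acc x => acc + (if x < 0 then 1 else 0)) a = a + cntNeg xs := by
  induction xs with
  | nil => intro a; simp [cntNeg]
  | cons x t ih =>
      intro a
      simp only [cntNeg, List.foldl_cons]
      rw [ih, ih ((0:Int) + _)]
      ring

theorem cntNeg_cons (x : Int) (t : List Int) :
    cntNeg (x :: t) = (if x < 0 then 1 else 0) + cntNeg t := by
  show List.foldl _ ((0:Int) + (if x < 0 then 1 else 0)) t = _
  rw [cntNeg_acc]
  ring

theorem cntNeg_append (xs ys : List Int) : cntNeg (xs ++ ys) = cntNeg xs + cntNeg ys := by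
  simp only [cntNeg, List.foldl_append]
  rw [cntNeg_acc]
  rfl

theorem cntNeg_eq_countP (xs : List Int) : cntNeg xs = (xs.countP (fun x => decide (x < 0)) : Int) := by
  induction xs with
  | nil => simp [cntNeg]
  | cons x t ih =>
      rw [cntNeg_cons, ih, List.countP_cons]
      by_cases h : x < 0 <;> simp [h] <;> try ring

theorem cntNeg_sublist {xs ys : List Int} (h : xs.Sublist ys) : cntNeg xs ≤ cntNeg ys := by
  rw [cntNeg_eq_countP, cntNeg_eq_countP]
  exact_mod_cast h.countP_le

theorem cntNeg_slice_le (lista : List Int) (i j : Int) (hi : 0 ≤ i) (hj : 0 ≤ j) :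
    cntNeg (PySem.List.slice lista (some i) (some j)) ≤ cntNeg lista := by
  rw [PySem.List.slice_toNat lista hi hj]
  exact cntNeg_sublist ((List.take_sublist _ _).trans (List.drop_sublist _ _))

theorem lastposI_snoc (ys : List Int) (x : Int) :
    lastposI (ys ++ [x]) = if x < 0 then (ys.length : Int) + 1 else lastposI ys := by
  induction ys with
  | nil => by_cases hx : x < 0 <;> simp [lastposI, hx]
  | cons y t ih =>
      by_cases hx : x < 0
      · have hl : (0 : Int) < (t.length : Int) + 1 := by positivity
        simp only [List.cons_append, lastposI, ih, hx, if_pos, List.length_cons]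
        rw [if_pos hl]
        push_cast
        ring
      · simp only [List.cons_append, lastposI, ih, hx, if_false]

-- generic: a fold whose step fixes the given state is the identity
theorem foldl_fix {α β : Type} (l : List α) (f : β → α → β) (st : β)
    (h : ∀ a ∈ l, f st a = st) : l.foldl f st = st := by
  induction l with
  | nil => rfl
  | cons x t ih =>
      simp only [List.foldl_cons, h x (List.mem_cons_self)]
      exact ih (fun a ha => h a (List.mem_cons_of_mem _ ha))

-- inner loop for i = 0: invariant after j = 1..m
theorem inner0 (lista : List Int) : ∀ (m : Nat), m ≤ lista.length →
    (PySem.List.pyRange 1 ((m : Int) + 1) 1).foldl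
      (fun st j =>
        let sub := PySem.List.slice lista (some 0) (some j)
        let negativos := sub.foldl (fun acc x => acc + (if x < 0 then 1 else 0)) (0 : Int)
        if negativos > st.1 then (negativos, (0 : Int), j) else st)
      ((0 : Int), (0 : Int), (0 : Int))
    = (cntNeg (lista.take m), 0, lastposI (lista.take m)) := by
  intro m
  induction m with
  | zero => intro _; simp [PySem.List.pyRange_one_eq_nil, cntNeg, lastposI]
  | succ m ih =>
      intro hm
      have hm' : m ≤ lista.length := Nat.le_of_succ_le hm
      have hml : m < lista.length := hm
      have hsplit : PySem.List.pyRange 1 ((↑(m + 1) : Int) + 1) 1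
          = PySem.List.pyRange 1 ((m : Int) + 1) 1 ++ [(m : Int) + 1] := by
        have h1 : ((↑(m + 1) : Int) + 1) = ((m : Int) + 1) + 1 := by push_cast; ring
        rw [h1, PySem.List.pyRange_one_succ_right (by omega)]
      rw [hsplit, List.foldl_append, ih hm']
      have htake : lista.take (m + 1) = lista.take m ++ [lista[m]] := by
        rw [List.take_add_one, List.getElem?_eq_getElem hml]
        rfl
      have hslice : PySem.List.slice lista (some 0) (some ((m : Int) + 1)) = lista.take (m + 1) := by
        have h0 : PySem.List.slice lista (some ((0:Nat) : Int)) (some ((↑(m+1) : Nat) : Int))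
            = ((lista.drop 0).take (m + 1 - 0)) := by
          rw [PySem.List.slice_natCast lista 0 (m+1)]
        simpa using h0
      simp only [List.foldl_cons, List.foldl_nil, hslice]
      have hc : (lista.take (m+1)).foldl (fun acc x => acc + (if x < 0 then 1 else 0)) (0:Int)
          = cntNeg (lista.take (m+1)) := rfl
      rw [hc, htake, cntNeg_append, lastposI_snoc]
      have hone : cntNeg [lista[m]] = if lista[m] < 0 then 1 else 0 := by
        by_cases hx : lista[m] < 0 <;> simp [cntNeg, hx]
      rw [hone]
      have hlen : ((lista.take m).length : Int) = (m : Int) := by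
        simp [List.length_take, Nat.min_eq_left hm']
      by_cases hx : lista[m] < 0
      · have hgt : cntNeg (lista.take m) + (if lista[m] < 0 then (1:Int) else 0) > cntNeg (lista.take m) := by
          rw [if_pos hx]; omega
        rw [if_pos hgt, if_pos hx, if_pos hx, hlen]
      · have hgt : ¬ (cntNeg (lista.take m) + (if lista[m] < 0 then (1:Int) else 0) > cntNeg (lista.take m)) := by
          rw [if_neg hx]; omega
        rw [if_neg hgt, if_neg hx, if_neg hx]
        simp

-- B's scan computes lastposI
theorem lastNegGo_eq (r : List Int) : lastNegGo r ((r.length : Int) - 1) = lastposI r.reverse := by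
  induction r with
  | nil => simp [lastNegGo, lastposI]
  | cons x rest ih =>
      simp only [lastNegGo, List.reverse_cons, lastposI_snoc, List.length_cons, List.length_reverse]
      by_cases hx : x < 0
      · rw [if_pos hx, if_pos hx]; push_cast; ring
      · rw [if_neg hx, if_neg hx]
        have h1 : ((rest.length + 1 : Nat) : Int) - 1 - 1 = (rest.length : Int) - 1 := by push_cast; ring
        rw [h1, ih]

theorem alt_eq (lista : List Int) :
    encontrar_intervalo_negativos_alt lista = [0, lastposI lista] := by
  unfold encontrar_intervalo_negativos_alt
  have h := lastNegGo_eq lista.reverse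
  rw [List.length_reverse] at h
  rw [h, List.reverse_reverse]

-- ===== VERDICT (by name: the statement is the Claim_ definition above) =====
theorem encontrar_intervalo_negativos_spec : Claim_equal_encontrar_intervalo_negativos := by
  intro lista _
  unfold Spec_encontrar_intervalo_negativos
  rw [alt_eq]
  unfold encontrar_intervalo_negativos
  simp only [PySem.List.len_eq]
  rcases h0 : lista with _ | ⟨y, t⟩
  · simp [PySem.List.pyRange_one_eq_nil, lastposI]
  rw [← h0]
  have hlen : (0 : Int) < (lista.length : Int) := by
    rw [h0]; simp
  rw [PySem.List.pyRange_one_cons hlen, List.foldl_cons]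
  have hinner : (PySem.List.pyRange ((0:Int) + 1) ((lista.length : Int) + 1) 1).foldl
      (fun st j =>
        let sub := PySem.List.slice lista (some 0) (some j)
        let negativos := sub.foldl (fun acc x => acc + (if x < 0 then 1 else 0)) (0 : Int)
        if negativos > st.1 then (negativos, (0 : Int), j) else st)
      ((0 : Int), (0 : Int), (0 : Int))
      = (cntNeg lista, 0, lastposI lista) := by
    have := inner0 lista lista.length (le_refl _)
    simpa using this
  rw [show ((0:Int) + 1) = 1 by ring] at hinner ⊢
  rw [hinner]
  rw [foldl_fix]
  intro i hi
  have hi1 : 1 ≤ i := (PySem.List.mem_pyRange_one.mp hi).1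
  apply foldl_fix
  intro j hj
  have hj0 : 0 ≤ j := by
    have := (PySem.List.mem_pyRange_one.mp hj).1; omega
  have hle := cntNeg_slice_le lista i j (by omega) hj0
  split
  · next hgt => exact absurd hgt (by simp only [gt_iff_lt, not_lt]; exact hle)
  · rfl
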